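-- pv_equiv track=rewrite | github.com/MrStrelow/BBRZ | Python/L04Funktionen/exercise1/solution/01_basic_muster_typ_annotationen.py | draw_diamant
-- ===== SOURCE A (Python) =====
-- from typing import List
--
-- dimension: int = 10
--
-- class Position:
--     TOP_RIGHT = 1
--     TOP_LEFT = 2
--     BOT_RIGHT = 3
--     BOT_LEFT = 4
--
-- def mirror_x(field: List[List[str]]) -> List[List[str]]:
--     copy_of_field = copy(field)
--     for y in range(len(field)):
--         for x in range(len(field)):
--             copy_of_field[y][x] = field[len(field) - 1 - y][x]
--     return copy_of_field
--
-- def mirror_y(field: List[List[str]]) -> List[List[str]]: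
--     copy_of_field = copy(field)
--     for y in range(len(field)):
--         for x in range(len(field)):
--             copy_of_field[y][x] = field[y][len(field) - 1 - x]
--     return copy_of_field
--
-- def copy(field: List[List[str]]) -> List[List[str]]:
--     return [[elem for elem in row] for row in field]
--
-- def zammstoepsln(container: List[List[str]], triangle: List[List[str]], position: int) -> List[List[str]]:
--     offset = len(triangle)
--     for y in range(len(triangle)):
--         for x in range(len(triangle)):
--             if position == Position.TOP_LEFT:
--                 container[y][x] = triangle[y][x]
--             elif position == Position.TOP_RIGHT:
--                 container[y][x + offset] = triangle[y][x]
--             elif position == Position.BOT_LEFT: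
--                 container[y + offset][x] = triangle[y][x]
--             elif position == Position.BOT_RIGHT:
--                 container[y + offset][x + offset] = triangle[y][x]
--     return container
--
-- def draw_diamant(triangle_top_right: List[List[str]]) -> List[List[str]]:
--     triangle_top_left  = mirror_y(triangle_top_right)
--     triangle_bot_right = mirror_x(triangle_top_right)
--     triangle_bot_left  = mirror_x(triangle_top_left)
--
--     container = [["" for _ in range(dimension * 2)] for _ in range(dimension * 2)]
--     diamant = zammstoepsln(container, triangle_top_right, Position.TOP_RIGHT)
--     diamant = zammstoepsln(container, triangle_top_left, Position.TOP_LEFT)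
--     diamant = zammstoepsln(container, triangle_bot_right, Position.BOT_RIGHT)
--     diamant = zammstoepsln(container, triangle_bot_left, Position.BOT_LEFT)
--
--     return diamant
-- ===== SOURCE B (Python) =====
-- def draw_diamant(triangle_top_right):
--     n = len(triangle_top_right)
--     size = 10 * 2
--     result = []
--     for y in range(size):
--         row = []
--         for x in range(size):
--             if y < 2 * n and x < 2 * n:
--                 tr = y if y < n else 2 * n - 1 - y
--                 tc = x - n if x >= n else n - 1 - x
--                 row.append(triangle_top_right[tr][tc])
--             else:
--                 row.append("")
--         result.append(row)
--     return result
-- ===== Notes on version B (the rewrite author's own statement) =====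
-- stated objective: simpler
-- what changed: Replaces the four mirror/copy/scatter passes (mirror_y, mirror_x twice, and four zammstoepsln placements into a mutated container) with one direct pass over the fixed 20x20 grid that maps each cell back to its source triangle index.
import Mathlib
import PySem

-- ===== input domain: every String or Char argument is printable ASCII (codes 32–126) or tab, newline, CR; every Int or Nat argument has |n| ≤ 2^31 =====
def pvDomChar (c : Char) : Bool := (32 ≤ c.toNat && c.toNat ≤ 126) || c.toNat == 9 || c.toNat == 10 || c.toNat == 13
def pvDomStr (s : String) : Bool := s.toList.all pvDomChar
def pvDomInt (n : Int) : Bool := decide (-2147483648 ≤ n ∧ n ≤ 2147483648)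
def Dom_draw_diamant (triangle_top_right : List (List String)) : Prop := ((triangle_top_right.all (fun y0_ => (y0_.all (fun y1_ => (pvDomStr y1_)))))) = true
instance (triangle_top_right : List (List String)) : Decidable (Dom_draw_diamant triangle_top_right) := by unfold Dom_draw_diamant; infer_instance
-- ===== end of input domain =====

-- B replaces A's four mirrored copies and four scatter passes into a mutated container by a
-- single pass over the fixed 20×20 grid that maps each cell back to its source triangle index
-- (objective: simpler).

-- ===== PORT A =====
-- field[i][j] read with default "" (every admitted input reads in range, see Pre_)
def pvE (g : List (List String)) (i j : Nat) : String := (g.getD i []).getD j ""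
-- field[i][j] = v  (Python list assignment; in range on every admitted input)
def pvSetE (g : List (List String)) (i j : Nat) (v : String) : List (List String) :=
  g.set i ((g.getD i []).set j v)
-- the doubly nested 'for y in range(n): for x in range(n):' loop shape shared by A's helpers
def pvLoop2 (n : Nat) (upd : List (List String) → Nat → Nat → List (List String))
    (g : List (List String)) : List (List String) :=
  (List.range n).foldl (fun acc y => (List.range n).foldl (fun acc2 x => upd acc2 y x) acc) g

def pycopy (field : List (List String)) : List (List String) :=
  field.map (fun row => row.map (fun elem => elem))

def mirror_x (field : List (List String)) : List (List String) :=
  pvLoop2 field.length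
    (fun a y x => pvSetE a y x (pvE field (field.length - 1 - y) x)) (pycopy field)

def mirror_y (field : List (List String)) : List (List String) :=
  pvLoop2 field.length
    (fun a y x => pvSetE a y x (pvE field y (field.length - 1 - x))) (pycopy field)

def zammstoepsln (container : List (List String)) (triangle : List (List String))
    (position : Int) : List (List String) :=
  pvLoop2 triangle.length
    (fun a y x =>
      if position = 2 then pvSetE a y x (pvE triangle y x)
      else if position = 1 then pvSetE a y (x + triangle.length) (pvE triangle y x)
      else if position = 4 then pvSetE a (y + triangle.length) x (pvE triangle y x)
      else if position = 3 then pvSetE a (y + triangle.length) (x + triangle.length) (pvE triangle y x)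
      else a) container

def draw_diamant (triangle_top_right : List (List String)) : List (List String) :=
  let triangle_top_left := mirror_y triangle_top_right
  let triangle_bot_right := mirror_x triangle_top_right
  let triangle_bot_left := mirror_x triangle_top_left
  let container := List.replicate (10 * 2) (List.replicate (10 * 2) "")
  let d1 := zammstoepsln container triangle_top_right 1
  let d2 := zammstoepsln d1 triangle_top_left 2
  let d3 := zammstoepsln d2 triangle_bot_right 3
  let d4 := zammstoepsln d3 triangle_bot_left 4
  d4

-- ===== PORT B =====
def draw_diamant_alt (triangle_top_right : List (List String)) : List (List String) :=
  let n := triangle_top_right.length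
  let size := 10 * 2
  (List.range size).map (fun y =>
    (List.range size).map (fun x =>
      if y < 2 * n ∧ x < 2 * n then
        let tr := if y < n then y else 2 * n - 1 - y
        let tc := if n ≤ x then x - n else n - 1 - x
        (triangle_top_right.getD tr []).getD tc ""
      else ""))

-- ===== PRECONDITION & SPEC =====
-- Pre_ excludes exactly the inputs on which A raises IndexError: a triangle with more than
-- 10 rows overflows the fixed 20×20 container, and a row shorter than the number of rows
-- is read out of range by the mirror helpers.
def Pre_draw_diamant (triangle_top_right : List (List String)) : Prop :=
  triangle_top_right.length ≤ 10 ∧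
    ∀ r ∈ triangle_top_right, triangle_top_right.length ≤ r.length

instance (triangle_top_right : List (List String)) : Decidable (Pre_draw_diamant triangle_top_right) := by
  unfold Pre_draw_diamant; infer_instance

def pvWitness_draw_diamant : List (List String) := [["a", "b"], ["c", "d"]]

def Spec_draw_diamant (triangle_top_right : List (List String)) (out : List (List String)) : Prop := out = draw_diamant_alt triangle_top_right
instance (triangle_top_right : List (List String)) (out : List (List String)) : Decidable (Spec_draw_diamant triangle_top_right out) := by unfold Spec_draw_diamant; infer_instance

-- ===== CLAIM (what is proved, stated in full; the proofs are below) =====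
def Claim_equal_draw_diamant : Prop := ∀ (triangle_top_right : List (List String)), Dom_draw_diamant triangle_top_right → Pre_draw_diamant triangle_top_right → Spec_draw_diamant triangle_top_right (draw_diamant triangle_top_right)

-- ===== LEMMAS AND PROOFS =====

theorem pycopy_id (f : List (List String)) : pycopy f = f := by
  simp [pycopy]

theorem pvE_setE (g : List (List String)) (i j k l : Nat) (v : String) :
    pvE (pvSetE g i j v) k l =
      if k = i ∧ l = j ∧ i < g.length ∧ j < (g.getD i []).length then v else pvE g k l := by
  unfold pvE pvSetE
  by_cases hk : k = i
  · subst hk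
    by_cases hi : k < g.length
    · simp only [List.getD, List.getElem?_set, List.getElem?_eq_getElem hi,
        Option.getD_some, hi, if_true]
      by_cases hl : l = j
      · subst hl
        by_cases hj : l < (g[k]).length <;> simp [hj, hi]
      · simp [Ne.symm hl, hl]
    · simp [List.getD, hi]
  · simp [List.getD, Ne.symm hk, hk]

theorem length_setE (g : List (List String)) (i j : Nat) (v : String) :
    (pvSetE g i j v).length = g.length := by
  simp [pvSetE]

theorem rowlen_setE (g : List (List String)) (i j k : Nat) (v : String) :
    ((pvSetE g i j v).getD k []).length = ((g.getD k []).length) := by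
  unfold pvSetE
  by_cases hk : k = i
  · subst hk
    by_cases hi : k < g.length
    · simp [List.getD, List.getElem?_set, hi, List.getElem?_eq_getElem hi]
    · simp [List.getD, hi]
  · simp [List.getD, Ne.symm hk]

-- generic fold invariant
theorem foldl_pres_mem {α β : Type} (f : α → β → α) (P : α → Prop) :
    ∀ (l : List β) (a : α), (∀ a b, b ∈ l → P a → P (f a b)) → P a → P (l.foldl f a) := by
  intro l
  induction l with
  | nil => intro a _ ha; simpa using ha
  | cons b t ih =>
      intro a h ha
      exact ih (f a b) (fun a' b' hb' => h a' b' (List.mem_cons_of_mem _ hb'))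
        (h a b (List.mem_cons_self) ha)

-- shape preservation for the nested write loop
theorem loop2_shape (n : Nat) (Y X : Nat → Nat) (v : Nat → Nat → String)
    (g : List (List String)) :
    (pvLoop2 n (fun a y x => pvSetE a (Y y) (X x) (v y x)) g).length = g.length ∧
      ∀ k, ((pvLoop2 n (fun a y x => pvSetE a (Y y) (X x) (v y x)) g).getD k []).length
            = (g.getD k []).length := by
  unfold pvLoop2
  refine foldl_pres_mem _
    (fun a => a.length = g.length ∧ ∀ k, ((a.getD k []).length) = ((g.getD k []).length))
    _ g ?_ ⟨rfl, fun _ => rfl⟩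
  intro a y _ ha
  refine foldl_pres_mem _
    (fun a => a.length = g.length ∧ ∀ k, ((a.getD k []).length) = ((g.getD k []).length))
    _ a ?_ ha
  intro a' x _ ha'
  exact ⟨by rw [length_setE, ha'.1], fun k => by rw [rowlen_setE, ha'.2 k]⟩

theorem loop2_untouched (n : Nat) (Y X : Nat → Nat) (v : Nat → Nat → String)
    (g : List (List String)) (i j : Nat)
    (h : ∀ y x, y < n → x < n → ¬(Y y = i ∧ X x = j)) :
    pvE (pvLoop2 n (fun a y x => pvSetE a (Y y) (X x) (v y x)) g) i j = pvE g i j := by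
  unfold pvLoop2
  refine foldl_pres_mem _ (fun a => pvE a i j = pvE g i j) _ g ?_ rfl
  intro a y hy ha
  refine foldl_pres_mem _ (fun a => pvE a i j = pvE g i j) _ a ?_ ha
  intro a' x hx ha'
  show pvE (pvSetE a' (Y y) (X x) (v y x)) i j = pvE g i j
  rw [pvE_setE]
  rw [if_neg, ha']
  intro hcon
  exact h y x (List.mem_range.1 hy) (List.mem_range.1 hx) ⟨hcon.1.symm, hcon.2.1.symm⟩

-- one row of writes preserves the grid shape
theorem inner_shape (Y0 : Nat) (X : Nat → Nat) (w : Nat → String)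
    (xs : List Nat) (g : List (List String)) :
    (xs.foldl (fun a x => pvSetE a Y0 (X x) (w x)) g).length = g.length ∧
      ∀ k, ((xs.foldl (fun a x => pvSetE a Y0 (X x) (w x)) g).getD k []).length
            = (g.getD k []).length := by
  refine foldl_pres_mem _
    (fun a => a.length = g.length ∧ ∀ k, ((a.getD k []).length) = ((g.getD k []).length))
    _ g ?_ ⟨rfl, fun _ => rfl⟩
  intro a x _ ha
  exact ⟨by rw [length_setE, ha.1], fun k => by rw [rowlen_setE, ha.2 k]⟩

-- one row of writes: the hit cell gets its value
theorem inner_hit (Y0 : Nat) (X : Nat → Nat) (w : Nat → String) (x0 : Nat) :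
    ∀ (xs : List Nat) (g : List (List String)), x0 ∈ xs →
      (∀ x ∈ xs, x ≠ x0 → X x ≠ X x0) →
      Y0 < g.length → X x0 < (g.getD Y0 []).length →
      pvE (xs.foldl (fun a x => pvSetE a Y0 (X x) (w x)) g) Y0 (X x0) = w x0 := by
  intro xs
  induction xs with
  | nil => intro g h; cases h
  | cons x xs ih =>
      intro g hmem hinj hb1 hb2
      simp only [List.foldl_cons]
      by_cases hx0 : x0 ∈ xs
      · exact ih _ hx0 (fun x' hx' => hinj x' (List.mem_cons_of_mem _ hx'))
          (by rw [length_setE]; exact hb1) (by rw [rowlen_setE]; exact hb2)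
      · have hx : x = x0 := by
          rcases List.mem_cons.1 hmem with h | h
          · exact h.symm
          · exact absurd h hx0
        subst hx
        refine foldl_pres_mem _ (fun a => pvE a Y0 (X x) = w x) _ _ ?_ ?_
        · intro a x' hx' ha
          show pvE (pvSetE a Y0 (X x') (w x')) Y0 (X x) = w x
          rw [pvE_setE, if_neg, ha]
          intro hcon
          exact hinj x' (List.mem_cons_of_mem _ hx')
            (fun he => hx0 (he ▸ hx')) hcon.2.1.symm
        · show pvE (pvSetE g Y0 (X x) (w x)) Y0 (X x) = w x
          rw [pvE_setE, if_pos ⟨rfl, rfl, hb1, hb2⟩]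

-- one row of writes does not change other rows
theorem inner_other_row (Y0 : Nat) (X : Nat → Nat) (w : Nat → String)
    (xs : List Nat) (g : List (List String)) (i j : Nat) (hne : i ≠ Y0) :
    pvE (xs.foldl (fun a x => pvSetE a Y0 (X x) (w x)) g) i j = pvE g i j := by
  refine foldl_pres_mem _ (fun a => pvE a i j = pvE g i j) _ g ?_ rfl
  intro a x _ ha
  rw [pvE_setE, if_neg, ha]
  intro hcon
  exact hne hcon.1

-- the nested write loop: an in-range target cell receives its value
theorem loop2_hit (n : Nat) (Y X : Nat → Nat) (v : Nat → Nat → String)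
    (y0 x0 : Nat) (hy0 : y0 < n) (hx0 : x0 < n)
    (hYinj : ∀ y, y < n → y ≠ y0 → Y y ≠ Y y0)
    (hXinj : ∀ x, x < n → x ≠ x0 → X x ≠ X x0) :
    ∀ (ys : List Nat) (g : List (List String)), y0 ∈ ys →
      (∀ y ∈ ys, y < n) →
      Y y0 < g.length → X x0 < (g.getD (Y y0) []).length →
      pvE (ys.foldl (fun acc y => (List.range n).foldl
            (fun acc2 x => pvSetE acc2 (Y y) (X x) (v y x)) acc) g) (Y y0) (X x0)
        = v y0 x0 := by
  intro ys
  induction ys with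
  | nil => intro g h; cases h
  | cons y ys ih =>
      intro g hmem hlt hb1 hb2
      simp only [List.foldl_cons]
      by_cases hy : y0 ∈ ys
      · refine ih _ hy (fun y' hy' => hlt y' (List.mem_cons_of_mem _ hy')) ?_ ?_
        · rw [(inner_shape (Y y) X (fun x => v y x) (List.range n) g).1]
          exact hb1
        · rw [(inner_shape (Y y) X (fun x => v y x) (List.range n) g).2 (Y y0)]
          exact hb2
      · have hyy : y = y0 := by
          rcases List.mem_cons.1 hmem with h | h
          · exact h.symm
          · exact absurd h hy
        subst hyy
        refine foldl_pres_mem _ (fun a => pvE a (Y y) (X x0) = v y x0) _ _ ?_ ?_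
        · intro a y' hy' ha
          show pvE ((List.range n).foldl (fun a2 x => pvSetE a2 (Y y') (X x) (v y' x)) a) (Y y) (X x0) = v y x0
          rw [inner_other_row _ _ _ _ _ _ _ ?_, ha]
          exact fun he => (hYinj y' (hlt y' (List.mem_cons_of_mem _ hy'))
            (fun h' => hy (h' ▸ hy')) he.symm).elim
        · exact inner_hit (Y y) X (fun x => v y x) x0 (List.range n) g
            (List.mem_range.2 hx0) (fun x' hx' => hXinj x' (List.mem_range.1 hx')) hb1 hb2

theorem getD_replicate' {α : Type} (n i : Nat) (a d : α) :
    (List.replicate n a).getD i d = if i < n then a else d := by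
  simp only [List.getD, List.getElem?_replicate]
  by_cases h : i < n <;> simp [h]

theorem pvE_container (i j : Nat) :
    pvE (List.replicate (10*2) (List.replicate (10*2) "")) i j = "" := by
  unfold pvE
  rw [getD_replicate']
  by_cases hi : i < 10*2
  · rw [if_pos hi, getD_replicate']
    by_cases hj : j < 10*2 <;> simp [hj]
  · simp [hi]

theorem container_len : (List.replicate (10*2) (List.replicate (10*2) ("" : String))).length = 20 := by
  simp

theorem container_row (k : Nat) (hk : k < 20) :
    ((List.replicate (10*2) (List.replicate (10*2) ("" : String))).getD k []).length = 20 := by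
  rw [getD_replicate', if_pos (by omega : k < 10*2)]
  simp

-- the zammstoepsln branches, resolved for each literal position
theorem zamm1_eq (c tr : List (List String)) :
    zammstoepsln c tr 1 = pvLoop2 tr.length (fun a y x => pvSetE a y (x + tr.length) (pvE tr y x)) c := by
  simp [zammstoepsln]
theorem zamm2_eq (c tr : List (List String)) :
    zammstoepsln c tr 2 = pvLoop2 tr.length (fun a y x => pvSetE a y x (pvE tr y x)) c := by
  simp [zammstoepsln]
theorem zamm3_eq (c tr : List (List String)) :
    zammstoepsln c tr 3 = pvLoop2 tr.length (fun a y x => pvSetE a (y + tr.length) (x + tr.length) (pvE tr y x)) c := by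
  simp [zammstoepsln]
theorem zamm4_eq (c tr : List (List String)) :
    zammstoepsln c tr 4 = pvLoop2 tr.length (fun a y x => pvSetE a (y + tr.length) x (pvE tr y x)) c := by
  simp [zammstoepsln]

theorem mirror_x_shape (f : List (List String)) :
    (mirror_x f).length = f.length ∧
      ∀ k, ((mirror_x f).getD k []).length = (f.getD k []).length := by
  simp only [mirror_x, pycopy_id]
  exact loop2_shape f.length (fun y => y) (fun x => x) (fun y x => pvE f (f.length - 1 - y) x) f

theorem mirror_y_shape (f : List (List String)) :
    (mirror_y f).length = f.length ∧
      ∀ k, ((mirror_y f).getD k []).length = (f.getD k []).length := by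
  simp only [mirror_y, pycopy_id]
  exact loop2_shape f.length (fun y => y) (fun x => x) (fun y x => pvE f y (f.length - 1 - x)) f

theorem mirror_x_val (f : List (List String))
    (hrow : ∀ k, k < f.length → f.length ≤ (f.getD k []).length)
    (y x : Nat) (hy : y < f.length) (hx : x < f.length) :
    pvE (mirror_x f) y x = pvE f (f.length - 1 - y) x := by
  simp only [mirror_x, pycopy_id, pvLoop2]
  exact loop2_hit f.length (fun y => y) (fun x => x)
    (fun y x => pvE f (f.length - 1 - y) x) y x hy hx
    (fun _ _ h => h) (fun _ _ h => h) (List.range f.length) f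
    (List.mem_range.2 hy) (fun _ h => List.mem_range.1 h) hy
    (lt_of_lt_of_le hx (hrow y hy))

theorem mirror_y_val (f : List (List String))
    (hrow : ∀ k, k < f.length → f.length ≤ (f.getD k []).length)
    (y x : Nat) (hy : y < f.length) (hx : x < f.length) :
    pvE (mirror_y f) y x = pvE f y (f.length - 1 - x) := by
  simp only [mirror_y, pycopy_id, pvLoop2]
  exact loop2_hit f.length (fun y => y) (fun x => x)
    (fun y x => pvE f y (f.length - 1 - x)) y x hy hx
    (fun _ _ h => h) (fun _ _ h => h) (List.range f.length) f
    (List.mem_range.2 hy) (fun _ h => List.mem_range.1 h) hy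
    (lt_of_lt_of_le hx (hrow y hy))

def GoodGrid (g : List (List String)) : Prop :=
  g.length = 20 ∧ ∀ k, k < 20 → ((g.getD k []).length) = 20

theorem good_loop2 (n : Nat) (Y X : Nat → Nat) (v : Nat → Nat → String)
    (g : List (List String)) (h : GoodGrid g) :
    GoodGrid (pvLoop2 n (fun a y x => pvSetE a (Y y) (X x) (v y x)) g) := by
  obtain ⟨hl, hr⟩ := loop2_shape n Y X v g
  exact ⟨by rw [hl, h.1], fun k hk => by rw [hr k, h.2 k hk]⟩

theorem good_container :
    GoodGrid (List.replicate (10*2) (List.replicate (10*2) "")) :=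
  ⟨container_len, container_row⟩

theorem A_good (t : List (List String)) : GoodGrid (draw_diamant t) := by
  simp only [draw_diamant, zamm1_eq, zamm2_eq, zamm3_eq, zamm4_eq]
  exact good_loop2 _ (fun y => y + _) (fun x => x) (fun y x => pvE _ y x) _
    (good_loop2 _ (fun y => y + _) (fun x => x + _) (fun y x => pvE _ y x) _
      (good_loop2 _ (fun y => y) (fun x => x) (fun y x => pvE _ y x) _
        (good_loop2 _ (fun y => y) (fun x => x + _) (fun y x => pvE _ y x) _ good_container)))

theorem A_entry (t : List (List String)) (h10 : t.length ≤ 10)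
    (hrow : ∀ k, k < t.length → t.length ≤ (t.getD k []).length)
    (i j : Nat) (hi : i < 20) (hj : j < 20) :
    pvE (draw_diamant t) i j =
      (if i < 2 * t.length ∧ j < 2 * t.length then
        pvE t (if i < t.length then i else 2 * t.length - 1 - i)
              (if t.length ≤ j then j - t.length else t.length - 1 - j)
      else "") := by
  have hTL := mirror_y_shape t
  have hBR := mirror_x_shape t
  have hBL := mirror_x_shape (mirror_y t)
  have hrowTL : ∀ k, k < (mirror_y t).length →
      (mirror_y t).length ≤ ((mirror_y t).getD k []).length := by
    intro k hk
    rw [hTL.1, hTL.2 k]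
    exact hrow k (by rw [hTL.1] at hk; exact hk)
  -- values of the three mirrored triangles
  have hTLv : ∀ y x, y < t.length → x < t.length →
      pvE (mirror_y t) y x = pvE t y (t.length - 1 - x) :=
    fun y x hy hx => mirror_y_val t hrow y x hy hx
  have hBRv : ∀ y x, y < t.length → x < t.length →
      pvE (mirror_x t) y x = pvE t (t.length - 1 - y) x :=
    fun y x hy hx => mirror_x_val t hrow y x hy hx
  have hBLv : ∀ y x, y < t.length → x < t.length →
      pvE (mirror_x (mirror_y t)) y x = pvE t (t.length - 1 - y) (t.length - 1 - x) := by
    intro y x hy hx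
    rw [mirror_x_val (mirror_y t) hrowTL y x (by rw [hTL.1]; exact hy) (by rw [hTL.1]; exact hx),
      hTL.1]
    exact hTLv _ _ (by omega) hx
  simp only [draw_diamant, zamm1_eq, zamm2_eq, zamm3_eq, zamm4_eq, hTL.1, hBR.1, hBL.1]
  set n := t.length with hn
  set g0 := (List.replicate (10*2) (List.replicate (10*2) "") : List (List String)) with hg0
  set g1 := pvLoop2 n (fun a y x => pvSetE a y (x + n) (pvE t y x)) g0 with hg1
  set g2 := pvLoop2 n (fun a y x => pvSetE a y x (pvE (mirror_y t) y x)) g1 with hg2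
  set g3 := pvLoop2 n (fun a y x => pvSetE a (y + n) (x + n) (pvE (mirror_x t) y x)) g2 with hg3
  have G0 : GoodGrid g0 := good_container
  have G1 : GoodGrid g1 :=
    good_loop2 n (fun y => y) (fun x => x + n) (fun y x => pvE t y x) g0 G0
  have G2 : GoodGrid g2 :=
    good_loop2 n (fun y => y) (fun x => x) (fun y x => pvE (mirror_y t) y x) g1 G1
  have G3 : GoodGrid g3 :=
    good_loop2 n (fun y => y + n) (fun x => x + n) (fun y x => pvE (mirror_x t) y x) g2 G2
  by_cases hd : i < 2 * n ∧ j < 2 * n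
  · rw [if_pos hd]
    have hn1 : 1 ≤ n := by omega
    by_cases hiN : i < n <;> by_cases hjN : j < n
    · -- TOP-LEFT quadrant: only the second placement writes (i, j)
      have e4 : pvE (pvLoop2 n (fun a y x => pvSetE a (y + n) x (pvE (mirror_x (mirror_y t)) y x)) g3) i j
          = pvE g3 i j := by
        apply loop2_untouched
        rintro y x hy hx ⟨h1, h2⟩; omega
      have e3 : pvE g3 i j = pvE g2 i j := by
        rw [hg3]; apply loop2_untouched
        rintro y x hy hx ⟨h1, h2⟩; omega
      have e2 : pvE g2 i j = pvE (mirror_y t) i j := by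
        rw [hg2]
        simp only [pvLoop2]
        exact loop2_hit n (fun y => y) (fun x => x) (fun y x => pvE (mirror_y t) y x)
          i j hiN hjN (fun _ _ h => h) (fun _ _ h => h) (List.range n) g1
          (List.mem_range.2 hiN) (fun _ h => List.mem_range.1 h)
          (by rw [G1.1]; exact hi) (by rw [G1.2 i hi]; exact hj)
      rw [e4, e3, e2, hTLv i j hiN hjN, if_pos hiN, if_neg (by omega : ¬ n ≤ j)]
    · -- TOP-RIGHT quadrant: only the first placement writes (i, j)
      have hjn : j - n < n := by omega
      have e4 : pvE (pvLoop2 n (fun a y x => pvSetE a (y + n) x (pvE (mirror_x (mirror_y t)) y x)) g3) i j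
          = pvE g3 i j := by
        apply loop2_untouched
        rintro y x hy hx ⟨h1, h2⟩; omega
      have e3 : pvE g3 i j = pvE g2 i j := by
        rw [hg3]; apply loop2_untouched
        rintro y x hy hx ⟨h1, h2⟩; omega
      have e2 : pvE g2 i j = pvE g1 i j := by
        rw [hg2]; apply loop2_untouched
        rintro y x hy hx ⟨h1, h2⟩; omega
      have e1 : pvE g1 i (j - n + n) = pvE t i (j - n) := by
        rw [hg1]
        simp only [pvLoop2]
        exact loop2_hit n (fun y => y) (fun x => x + n) (fun y x => pvE t y x)
          i (j - n) hiN hjn (fun _ _ h => h)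
          (by intro x hx hne; simp only []; omega) (List.range n) g0
          (List.mem_range.2 hiN) (fun _ h => List.mem_range.1 h)
          (by rw [G0.1]; exact hi) (by simp only []; rw [G0.2 i hi]; omega)
      rw [show j - n + n = j by omega] at e1
      rw [e4, e3, e2, e1, if_pos hiN, if_pos (by omega : n ≤ j)]
    · -- BOTTOM-LEFT quadrant: only the fourth placement writes (i, j)
      have hin : i - n < n := by omega
      have e4 : pvE (pvLoop2 n (fun a y x => pvSetE a (y + n) x (pvE (mirror_x (mirror_y t)) y x)) g3) (i - n + n) j
          = pvE (mirror_x (mirror_y t)) (i - n) j := by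
        simp only [pvLoop2]
        exact loop2_hit n (fun y => y + n) (fun x => x) (fun y x => pvE (mirror_x (mirror_y t)) y x)
          (i - n) j hin hjN (by intro y hy hne; simp only []; omega)
          (fun _ _ h => h) (List.range n) g3
          (List.mem_range.2 hin) (fun _ h => List.mem_range.1 h)
          (by simp only []; rw [G3.1]; omega)
          (by simp only []; rw [G3.2 (i - n + n) (by omega)]; exact hj)
      rw [show i - n + n = i by omega] at e4
      rw [e4, hBLv (i - n) j hin hjN, if_neg (by omega : ¬ i < n), if_neg (by omega : ¬ n ≤ j)]
      congr 1 <;> omega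
    · -- BOTTOM-RIGHT quadrant: only the third placement writes (i, j)
      have hin : i - n < n := by omega
      have hjn : j - n < n := by omega
      have e4 : pvE (pvLoop2 n (fun a y x => pvSetE a (y + n) x (pvE (mirror_x (mirror_y t)) y x)) g3) i j
          = pvE g3 i j := by
        apply loop2_untouched
        rintro y x hy hx ⟨h1, h2⟩; omega
      have e3 : pvE g3 (i - n + n) (j - n + n) = pvE (mirror_x t) (i - n) (j - n) := by
        rw [hg3]
        simp only [pvLoop2]
        exact loop2_hit n (fun y => y + n) (fun x => x + n) (fun y x => pvE (mirror_x t) y x)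
          (i - n) (j - n) hin hjn (by intro y hy hne; simp only []; omega)
          (by intro x hx hne; simp only []; omega)
          (List.range n) g2 (List.mem_range.2 hin) (fun _ h => List.mem_range.1 h)
          (by simp only []; rw [G2.1]; omega)
          (by simp only []; rw [G2.2 (i - n + n) (by omega)]; omega)
      rw [show i - n + n = i by omega, show j - n + n = j by omega] at e3
      rw [e4, e3, hBRv (i - n) (j - n) hin hjn, if_neg (by omega : ¬ i < n),
        if_pos (by omega : n ≤ j)]
      congr 1 <;> omega
  · -- outside the diamond: no placement writes (i, j), the cell keeps ""
    rw [if_neg hd]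
    have e4 : pvE (pvLoop2 n (fun a y x => pvSetE a (y + n) x (pvE (mirror_x (mirror_y t)) y x)) g3) i j
        = pvE g3 i j := by
      apply loop2_untouched
      rintro y x hy hx ⟨h1, h2⟩; omega
    have e3 : pvE g3 i j = pvE g2 i j := by
      rw [hg3]; apply loop2_untouched
      rintro y x hy hx ⟨h1, h2⟩; omega
    have e2 : pvE g2 i j = pvE g1 i j := by
      rw [hg2]; apply loop2_untouched
      rintro y x hy hx ⟨h1, h2⟩; omega
    have e1 : pvE g1 i j = pvE g0 i j := by
      rw [hg1]; apply loop2_untouched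
      rintro y x hy hx ⟨h1, h2⟩; omega
    rw [e4, e3, e2, e1, hg0, pvE_container]

theorem B_len (t : List (List String)) : (draw_diamant_alt t).length = 20 := by
  simp [draw_diamant_alt]

theorem B_row (t : List (List String)) (k : Nat) (hk : k < 20) :
    ((draw_diamant_alt t).getD k []).length = 20 := by
  simp [draw_diamant_alt, List.getD, List.getElem?_map, List.getElem?_range, hk]

theorem B_entry (t : List (List String)) (i j : Nat) (hi : i < 20) (hj : j < 20) :
    pvE (draw_diamant_alt t) i j =
      (if i < 2 * t.length ∧ j < 2 * t.length then
        pvE t (if i < t.length then i else 2 * t.length - 1 - i)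
              (if t.length ≤ j then j - t.length else t.length - 1 - j)
      else "") := by
  simp [draw_diamant_alt, pvE, List.getD, List.getElem?_map, List.getElem?_range, hi, hj]

theorem draw_diamant_spec : Claim_equal_draw_diamant := by
  intro t _ hpre
  obtain ⟨h10, hrowmem⟩ := hpre
  have hrow : ∀ k, k < t.length → t.length ≤ (t.getD k []).length := by
    intro k hk
    rw [List.getD_eq_getElem t [] hk]
    exact hrowmem _ (List.getElem_mem hk)
  show draw_diamant t = draw_diamant_alt t
  have hA := A_good t
  apply List.ext_getElem (by rw [hA.1, B_len])
  intro i h1 h2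
  have hi20 : i < 20 := by rw [hA.1] at h1; exact h1
  have hrowA : (draw_diamant t)[i].length = 20 := by
    have := hA.2 i hi20
    rwa [List.getD_eq_getElem _ [] h1] at this
  have hrowB : (draw_diamant_alt t)[i].length = 20 := by
    have := B_row t i hi20
    rwa [List.getD_eq_getElem _ [] h2] at this
  apply List.ext_getElem (hrowA.trans hrowB.symm)
  intro j hj1 hj2
  have hj20 : j < 20 := by rw [hrowA] at hj1; exact hj1
  have eA : (draw_diamant t)[i][j] = pvE (draw_diamant t) i j := by
    unfold pvE
    rw [List.getD_eq_getElem _ [] h1]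
    exact (List.getD_eq_getElem _ "" hj1).symm
  have eB : (draw_diamant_alt t)[i][j] = pvE (draw_diamant_alt t) i j := by
    unfold pvE
    rw [List.getD_eq_getElem _ [] h2]
    exact (List.getD_eq_getElem _ "" hj2).symm
  rw [eA, A_entry t h10 hrow i j hi20 hj20, ← B_entry t i j hi20 hj20]
  exact eB.symm
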